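-- pv_equiv track=rewrite | github.com/daniel-reich/turbo-robot | bd2fLqAxHfGTx86Qx_12.py | can_complete
-- ===== SOURCE A (Python) =====
-- def can_complete(initial, word):
--   l1 = list(initial)
--   l2 = l1.copy()
--   for i in range(len(word)):
--     if word[i] in l1:
--       l1.remove(word[i])
--       del l2[0]
--       if l1 != l2:
--         return False
--   if l1 == []:
--     return True
--   else:
--     return False
-- ===== SOURCE B (Python) =====
-- def can_complete(initial, word):
--     counts = {}
--     for c in initial:
--         counts[c] = counts.get(c, 0) + 1
--     i = 0
--     for c in word:
--         if counts.get(c, 0) > 0: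
--             if c != initial[i]:
--                 return False
--             counts[initial[i]] = counts[initial[i]] - 1
--             i = i + 1
--     return i == len(initial)
-- ===== Notes on version B (the rewrite author's own statement) =====
-- stated objective: faster
-- what changed: Replaces the two mirrored lists with their O(m)-per-step membership test, remove and whole-list comparison by a front index into initial plus a character-count dict of the unconsumed suffix, giving O(1) work per character.
import Mathlib
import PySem

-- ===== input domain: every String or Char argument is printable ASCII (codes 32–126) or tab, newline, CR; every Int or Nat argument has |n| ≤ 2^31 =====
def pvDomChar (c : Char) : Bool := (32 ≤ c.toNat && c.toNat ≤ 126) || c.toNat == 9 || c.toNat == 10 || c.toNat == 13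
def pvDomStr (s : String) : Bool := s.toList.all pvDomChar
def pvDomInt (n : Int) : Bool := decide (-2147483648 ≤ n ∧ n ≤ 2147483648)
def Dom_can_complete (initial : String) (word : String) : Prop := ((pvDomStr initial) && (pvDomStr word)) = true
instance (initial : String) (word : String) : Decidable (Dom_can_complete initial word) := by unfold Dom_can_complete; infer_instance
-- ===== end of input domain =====

-- B replaces A's two mirrored lists (membership test, remove and whole-list comparison, each O(m) per step)
-- by a front index into `initial` plus a character-count dict of the unconsumed suffix: objective = faster.

-- ===== PORT A =====
-- A's `for i in range(len(word)): … word[i] …` reads the characters of word in order: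
-- ported as the obvious structural recursion over word's character list, state (l1, l2).
def canCompleteLoopA : List Char → List Char → List Char → Bool
  | l1, _, [] => l1 == []                                   -- after the loop: return l1 == []
  | l1, l2, c :: w =>
    if l1.contains c then                                   -- if word[i] in l1
      match PySem.List.remove? l1 c, l2 with                -- l1.remove(word[i]); del l2[0]
      | some l1', _ :: l2' =>
        if l1' == l2' then canCompleteLoopA l1' l2' w else false   -- if l1 != l2: return False
      | _, _ => false   -- remove on a list without c / del l2[0] on []: unreachable from the initial state
    else canCompleteLoopA l1 l2 w

def can_complete (initial : String) (word : String) : Bool :=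
  canCompleteLoopA initial.toList initial.toList word.toList       -- l1 = list(initial); l2 = l1.copy()

-- ===== PORT B =====
def canCompleteLoopB (initial : List Char) : PySem.Dict Char Int → Nat → List Char → Bool
  | _, i, [] => i == initial.length                         -- return i == len(initial)
  | d, i, c :: w =>
    if d.getD c 0 > 0 then                                  -- counts.get(c, 0) > 0
      let ch := PySem.List.pyGetD initial (i : Int) ' '     -- initial[i]; i < len(initial) whenever taken
      if c != ch then false
      else canCompleteLoopB initial (d.insert ch (d.getD ch 0 - 1)) (i + 1) w
    else canCompleteLoopB initial d i w

def can_complete_alt (initial : String) (word : String) : Bool :=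
  let counts := initial.toList.foldl (fun d c => d.insert c (d.getD c 0 + 1)) PySem.Dict.empty
  canCompleteLoopB initial.toList counts 0 word.toList

-- ===== PRECONDITION & SPEC =====
def Spec_can_complete (initial : String) (word : String) (out : Bool) : Prop := out = can_complete_alt initial word
instance (initial : String) (word : String) (out : Bool) : Decidable (Spec_can_complete initial word out) := by unfold Spec_can_complete; infer_instance

-- ===== CLAIM (what is proved, stated in full; the proofs are below) =====
def Claim_equal_can_complete : Prop := ∀ (initial : String) (word : String), Dom_can_complete initial word → Spec_can_complete initial word (can_complete initial word)

-- ===== LEMMAS AND PROOFS =====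

-- B's count-building fold is exactly collections.Counter.
lemma counts_eq_counter (xs : List Char) :
    xs.foldl (fun d c => d.insert c (d.getD c 0 + 1)) PySem.Dict.empty = PySem.Dict.counter xs := rfl

-- Removing a non-head element never reproduces the tail (the count of the removed element drops).
lemma cons_erase_ne_tail (h c : Char) (t : List Char) (hne : c ≠ h) (hmem : c ∈ t) :
    h :: t.erase c ≠ t := by
  intro heq
  have hcount : (h :: t.erase c).count c = t.count c := by rw [heq]
  rw [List.count_cons_of_ne (Ne.symm hne), List.count_erase_self] at hcount
  have hpos : 0 < t.count c := List.count_pos_iff.mpr hmem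
  omega

-- Loop correspondence: A's two equal lists are the suffix init.drop i, B's dict counts that suffix.
lemma loopAB (w : List Char) : ∀ (init : List Char) (i : Nat) (d : PySem.Dict Char Int),
    i ≤ init.length → (∀ c, d.getD c 0 = ((init.drop i).count c : Int)) →
    canCompleteLoopA (init.drop i) (init.drop i) w = canCompleteLoopB init d i w := by
  induction w with
  | nil =>
    intro init i d hi hd
    have hiff : (init.drop i = []) ↔ (i = init.length) := by
      rw [List.drop_eq_nil_iff]; omega
    simp only [canCompleteLoopA, canCompleteLoopB]
    rw [Bool.eq_iff_iff]; simp [hiff]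
  | cons c w ih =>
    intro w_init i d hi hd
    by_cases hc : c ∈ w_init.drop i
    · obtain ⟨h, t, hs⟩ : ∃ h t, w_init.drop i = h :: t := by
        cases hdrop : w_init.drop i with
        | nil => rw [hdrop] at hc; exact absurd hc (List.not_mem_nil)
        | cons h t => exact ⟨h, t, rfl⟩
      have hget : w_init[i]? = some h := by
        have h0 : (List.drop i w_init)[0]? = w_init[i + 0]? := List.getElem?_drop
        rw [hs] at h0; simpa using h0.symm
      have hch : PySem.List.pyGetD w_init (i : Int) ' ' = h := by
        rw [PySem.List.pyGetD_natCast]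
        simp [List.getD, hget]
      have hguard : d.getD c 0 > 0 := by
        rw [hd c]
        exact_mod_cast List.count_pos_iff.mpr hc
      have hdrop1 : w_init.drop (i + 1) = t := by
        have htl : (List.drop i w_init).tail = List.drop (i + 1) w_init := List.tail_drop
        rw [hs] at htl; simpa using htl.symm
      have hilt : i < w_init.length := by
        by_contra hle
        have hnil : w_init.drop i = [] := List.drop_eq_nil_iff.mpr (by omega)
        rw [hnil] at hs; exact absurd hs (by simp)
      by_cases hch' : c = h
      · -- matched the front: both consume one character
        subst hch'
        have hA : canCompleteLoopA (c :: t) (c :: t) (c :: w) = canCompleteLoopA t t w := by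
          simp [canCompleteLoopA]
        have hB : canCompleteLoopB w_init d i (c :: w)
            = canCompleteLoopB w_init (d.insert c (d.getD c 0 - 1)) (i + 1) w := by
          simp only [canCompleteLoopB, if_pos hguard, hch]
          simp
        rw [hs, hA, hB]
        have hinv : ∀ c', (d.insert c (d.getD c 0 - 1)).getD c' 0
            = (((w_init.drop (i + 1)).count c' : Nat) : Int) := by
          intro c'
          rw [PySem.Dict.getD_insert, hdrop1]
          by_cases hc' : c' = c
          · subst hc'
            rw [if_pos rfl, hd c', hs, List.count_cons_self]
            push_cast; ring
          · rw [if_neg hc', hd c', hs, List.count_cons_of_ne (fun he => hc' he.symm)]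
        have hrec := ih w_init (i + 1) _ (by omega) hinv
        rw [hdrop1] at hrec
        exact hrec
      · -- c is in the suffix but not at the front: both return False
        have hcmemt : c ∈ t := by
          have hmem := hc; rw [hs] at hmem
          cases hmem with
          | head => exact absurd rfl hch'
          | tail _ hmem' => exact hmem'
        have hne' : h ≠ c := fun he => hch' he.symm
        have hrem : PySem.List.remove? (h :: t) c = some (h :: t.erase c) := by
          rw [PySem.List.remove?_cons_of_ne t hne',
              PySem.List.remove?_eq_some_erase _ _ hcmemt]
          rfl
        have hbeq : ((h :: t.erase c) == t) = false :=
          beq_eq_false_iff_ne.mpr (cons_erase_ne_tail h c t hch' hcmemt)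
        have hA : canCompleteLoopA (h :: t) (h :: t) (c :: w) = false := by
          simp only [canCompleteLoopA]
          rw [if_pos (by simp [hcmemt]), hrem]
          simp [hbeq]
        have hB : canCompleteLoopB w_init d i (c :: w) = false := by
          simp only [canCompleteLoopB, if_pos hguard, hch]
          simp [hch']
        rw [hs, hA, hB]
    · -- c not in the remaining suffix: both skip it
      have hcon : (w_init.drop i).contains c = false := by simpa using hc
      have hA : canCompleteLoopA (w_init.drop i) (w_init.drop i) (c :: w)
          = canCompleteLoopA (w_init.drop i) (w_init.drop i) w := by
        simp only [canCompleteLoopA]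
        rw [hcon]
        simp
      have hzero : d.getD c 0 = 0 := by
        rw [hd c, List.count_eq_zero_of_not_mem hc]; rfl
      have hB : canCompleteLoopB w_init d i (c :: w) = canCompleteLoopB w_init d i w := by
        simp only [canCompleteLoopB, hzero]
        simp
      rw [hA, hB]
      exact ih w_init i d hi hd

-- ===== VERDICT (by name: the statement is the Claim_ definition above) =====
theorem can_complete_spec : Claim_equal_can_complete := by
  intro initial word _
  unfold Spec_can_complete can_complete can_complete_alt
  rw [counts_eq_counter]
  have hmain := loopAB word.toList initial.toList 0 (PySem.Dict.counter initial.toList)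
    (Nat.zero_le _) (fun c => PySem.Dict.getD_counter initial.toList c)
  rw [List.drop_zero] at hmain
  exact hmain
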